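-- pv_equiv track=rewrite | github.com/reddatetea/fisha | qingchuanBocTdd01.py | getDic2
-- ===== SOURCE A (Python) =====
-- def getDic2(lst,dates,detals):
--     dic_num = {}
--     num_detal = {}
--     for i in range(len(lst)):
--         num = lst[i]
--         date = dates[i]
--         detal = detals[i]
--         num_total = lst.count(num)
--         dic_num[num] = num_total
--         if num_total == 1:
--             num_detal[num] = [date,detal]
--     return dic_num,num_detal
-- ===== SOURCE B (Python) =====
-- def getDic2(lst, dates, detals):
--     groups = {}
--     for i, num in enumerate(lst):
--         groups.setdefault(num, []).append([dates[i], detals[i]])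
--     dic_num = {}
--     num_detal = {}
--     for num, records in groups.items():
--         dic_num[num] = len(records)
--         if len(records) == 1:
--             num_detal[num] = records[0]
--     return dic_num, num_detal
-- ===== Notes on version B (the rewrite author's own statement) =====
-- stated objective: faster
-- what changed: Instead of calling lst.count inside the index loop (a rescan per element), B builds one dict grouping each value's [date,detal] records in a single pass, then derives both result dicts from group sizes in one pass over the groups.
import Mathlib
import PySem

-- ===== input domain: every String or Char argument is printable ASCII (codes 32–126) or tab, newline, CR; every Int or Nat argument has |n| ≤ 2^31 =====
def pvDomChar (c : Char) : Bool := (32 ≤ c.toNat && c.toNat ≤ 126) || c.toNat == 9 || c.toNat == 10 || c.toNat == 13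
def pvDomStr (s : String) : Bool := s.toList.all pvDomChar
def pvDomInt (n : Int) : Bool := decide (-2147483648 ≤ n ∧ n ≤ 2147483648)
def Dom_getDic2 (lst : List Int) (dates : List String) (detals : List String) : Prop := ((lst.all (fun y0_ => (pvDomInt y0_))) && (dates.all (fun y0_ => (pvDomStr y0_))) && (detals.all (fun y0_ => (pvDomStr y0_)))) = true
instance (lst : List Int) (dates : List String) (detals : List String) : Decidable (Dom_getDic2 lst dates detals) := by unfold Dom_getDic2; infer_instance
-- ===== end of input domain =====

-- B replaces A's per-element lst.count rescan by one grouping pass plus one pass over the groups (measured faster).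

-- ===== PORT A =====
def getDic2 (lst : List Int) (dates : List String) (detals : List String) : (List (Int × Int)) × (List (Int × List String)) :=
  let st := (PySem.List.pyRange 0 (lst.length : Int) 1).foldl
    (fun (st : PySem.Dict Int Int × PySem.Dict Int (List String)) i =>
      let num := PySem.List.pyGetD lst i 0
      let date := PySem.List.pyGetD dates i ""
      let detal := PySem.List.pyGetD detals i ""
      let numTotal : Int := (PySem.List.count lst num : Int)
      (st.1.insert num numTotal,
       if numTotal == 1 then st.2.insert num [date, detal] else st.2))
    (PySem.Dict.empty, PySem.Dict.empty)
  (st.1.items, st.2.items)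

-- ===== PORT B =====
def getDic2_alt (lst : List Int) (dates : List String) (detals : List String) : (List (Int × Int)) × (List (Int × List String)) :=
  let groups : PySem.Dict Int (List (List String)) :=
    (PySem.List.enumerate lst).foldl
      (fun g p => g.modify p.2 []
        (fun rs => rs ++ [[PySem.List.pyGetD dates p.1 "", PySem.List.pyGetD detals p.1 ""]]))
      PySem.Dict.empty
  let st := groups.items.foldl
    (fun (st : PySem.Dict Int Int × PySem.Dict Int (List String)) q =>
      (st.1.insert q.1 (q.2.length : Int),
       if q.2.length == 1 then st.2.insert q.1 (PySem.List.pyGetD q.2 0 []) else st.2))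
    (PySem.Dict.empty, PySem.Dict.empty)
  (st.1.items, st.2.items)

-- ===== PRECONDITION & SPEC =====
-- Pre_ excludes exactly the inputs where Python A raises IndexError: some index i < len(lst) is out of range for dates or detals.
def Pre_getDic2 (lst : List Int) (dates : List String) (detals : List String) : Prop :=
  lst.length ≤ dates.length ∧ lst.length ≤ detals.length
instance (lst : List Int) (dates : List String) (detals : List String) : Decidable (Pre_getDic2 lst dates detals) := by unfold Pre_getDic2; infer_instance
def pvWitness_getDic2 : List Int × List String × List String := ([1, 2, 1], ["a", "b", "c"], ["x", "y", "z"])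

def Spec_getDic2 (lst : List Int) (dates : List String) (detals : List String) (out : (List (Int × Int)) × (List (Int × List String))) : Prop := out = getDic2_alt lst dates detals
instance (lst : List Int) (dates : List String) (detals : List String) (out : (List (Int × Int)) × (List (Int × List String))) : Decidable (Spec_getDic2 lst dates detals out) := by unfold Spec_getDic2; infer_instance

-- ===== CLAIM (what is proved, stated in full; the proofs are below) =====
def Claim_equal_getDic2 : Prop := ∀ (lst : List Int) (dates : List String) (detals : List String), Dom_getDic2 lst dates detals → Pre_getDic2 lst dates detals → Spec_getDic2 lst dates detals (getDic2 lst dates detals)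

-- ===== LEMMAS AND PROOFS =====

-- index loop over three parallel lists = fold over the zipped rows
theorem pv_foldl_range_get3 {σ : Type} (f : σ → Int → String → String → σ) :
    ∀ (xs : List Int) (ys zs : List String) (init : σ), xs.length ≤ ys.length → xs.length ≤ zs.length →
      (List.range xs.length).foldl (fun acc k => f acc (xs.getD k 0) (ys.getD k "") (zs.getD k "")) init
      = (xs.zip (ys.zip zs)).foldl (fun acc p => f acc p.1 p.2.1 p.2.2) init := by
  intro xs
  induction xs with
  | nil => intro ys zs init _ _; simp
  | cons x xs ih =>
    intro ys zs init hy hz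
    cases ys with
    | nil => simp at hy
    | cons y ys =>
      cases zs with
      | nil => simp at hz
      | cons z zs =>
        simp only [List.length_cons, List.range_succ_eq_map, List.foldl_cons, List.foldl_map,
          List.getD_cons_zero, List.getD_cons_succ, List.zip_cons_cons]
        exact ih ys zs _ (by simpa using hy) (by simpa using hz)

theorem pv_enumerate_shift {α : Type} : ∀ (xs : List α) (s : Int),
    PySem.List.enumerate xs (s + 1) = (PySem.List.enumerate xs s).map (fun p => (p.1 + 1, p.2)) := by
  intro xs
  induction xs with
  | nil => intro s; simp [PySem.List.enumerate_nil]
  | cons x xs ih => intro s; simp [PySem.List.enumerate_cons, ih (s + 1)]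

theorem pv_enumerate_eq_map_range : ∀ (xs : List Int),
    PySem.List.enumerate xs 0 = (List.range xs.length).map (fun (k : Nat) => ((k : Int), xs.getD k 0)) := by
  intro xs
  induction xs with
  | nil => simp [PySem.List.enumerate_nil]
  | cons x xs ih =>
    have hshift := pv_enumerate_shift xs 0
    rw [PySem.List.enumerate_cons, hshift, ih, List.length_cons, List.range_succ_eq_map,
      List.map_cons, List.map_map, List.map_map]
    refine congrArg₂ _ (by simp) ?_
    apply List.map_congr_left
    intro k _
    simp only [Function.comp_apply, List.getD_cons_succ, Prod.mk.injEq]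
    constructor
    · push_cast; ring
    · trivial

-- a fold of inserts whose value depends only on the key
theorem pv_getD_foldl_insert_by_key {β ν : Type} (key : β → Int) (v : Int → ν) :
    ∀ (l : List β) (d : PySem.Dict Int ν) (k : Int) (dflt : ν),
      (l.foldl (fun d x => d.insert (key x) (v (key x))) d).getD k dflt
      = if k ∈ l.map key then v k else d.getD k dflt := by
  intro l
  induction l with
  | nil => intro d k dflt; simp
  | cons x xs ih =>
    intro d k dflt
    simp only [List.foldl_cons, ih, List.map_cons, List.mem_cons, PySem.Dict.getD_insert]
    by_cases hk : k ∈ xs.map key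
    · simp [hk]
    · by_cases he : k = key x <;> simp [hk, he]

-- first-occurrence dedup commutes with filtering down to count-one elements
theorem pv_ofList_filter_count_one (P : Int → Bool) :
    ∀ (l : List Int), (∀ k, P k = true → l.count k ≤ 1) →
      (PySem.Set.ofList l : List Int).filter P = l.filter P := by
  intro l
  induction l with
  | nil => simp [PySem.Set.ofList]
  | cons x xs ih =>
    intro h
    rw [PySem.Set.ofList_cons]
    have hsub : ∀ k, P k = true → xs.count k ≤ 1 := fun k hk =>
      le_trans List.count_le_count_cons (h k hk)
    by_cases hx : P x = true
    · have hcx : xs.count x = 0 := by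
        have h1 := h x hx
        simp at h1
        omega
      have hnx : x ∉ xs := by
        intro hmem
        exact absurd (List.count_pos_iff.mpr hmem) (by omega)
      have hnotin : x ∉ (PySem.Set.ofList xs : List Int) :=
        fun hmem => hnx ((PySem.Set.mem_ofList xs x).mp hmem)
      have hdisc : (PySem.Set.ofList xs : List Int).discard x = PySem.Set.ofList xs := by
        unfold PySem.Set.discard
        apply List.filter_eq_self.mpr
        intro a ha
        have hne : a ≠ x := fun hax => hnotin (hax ▸ ha)
        simp [hne]
      rw [hdisc, List.filter_cons, List.filter_cons, if_pos hx, if_pos hx, ih hsub]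
    · replace hx : P x = false := by simpa using hx
      rw [List.filter_cons, List.filter_cons]
      simp only [hx, Bool.false_eq_true, if_false]
      rw [← ih hsub]
      unfold PySem.Set.discard
      rw [List.filter_filter]
      apply List.filter_congr
      intro a _
      by_cases hax : a = x
      · subst hax; simp [hx]
      · simp [hax]

-- central: same rows, A's count-based loop = B's grouping
theorem pv_main (lst : List Int) (r : List (Int × String × String))
    (hl : r.map (fun p => p.1) = lst) :
    (let stA := r.foldl
        (fun (st : PySem.Dict Int Int × PySem.Dict Int (List String)) p =>
          (st.1.insert p.1 ((PySem.List.count lst p.1 : Int)),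
           if ((PySem.List.count lst p.1 : Int) == 1) then st.2.insert p.1 [p.2.1, p.2.2] else st.2))
        (PySem.Dict.empty, PySem.Dict.empty)
     (stA.1.items, stA.2.items))
    = (let g := r.foldl
          (fun (g : PySem.Dict Int (List (List String))) p =>
            g.modify p.1 [] (fun rs => rs ++ [[p.2.1, p.2.2]]))
          PySem.Dict.empty
       let stB := g.items.foldl
          (fun (st : PySem.Dict Int Int × PySem.Dict Int (List String)) q =>
            (st.1.insert q.1 (q.2.length : Int),
             if (q.2.length == 1) then st.2.insert q.1 (PySem.List.pyGetD q.2 0 []) else st.2))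
          (PySem.Dict.empty, PySem.Dict.empty)
       (stB.1.items, stB.2.items)) := by
  simp only []
  have hA : (r.foldl
      (fun (st : PySem.Dict Int Int × PySem.Dict Int (List String)) p =>
        (st.1.insert p.1 ((PySem.List.count lst p.1 : Int)),
         if ((PySem.List.count lst p.1 : Int) == 1) then st.2.insert p.1 [p.2.1, p.2.2] else st.2))
      (PySem.Dict.empty, PySem.Dict.empty))
      = (r.foldl (fun (d : PySem.Dict Int Int) p => d.insert p.1 ((PySem.List.count lst p.1 : Int))) PySem.Dict.empty,
         r.foldl (fun (m : PySem.Dict Int (List String)) p =>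
           if ((PySem.List.count lst p.1 : Int) == 1) then m.insert p.1 [p.2.1, p.2.2] else m) PySem.Dict.empty) :=
    PySem.List.foldl_prod_mk
      (fun (d : PySem.Dict Int Int) (p : Int × String × String) => d.insert p.1 ((PySem.List.count lst p.1 : Int)))
      (fun (m : PySem.Dict Int (List String)) (p : Int × String × String) =>
        if ((PySem.List.count lst p.1 : Int) == 1) then m.insert p.1 [p.2.1, p.2.2] else m)
      r PySem.Dict.empty PySem.Dict.empty
  rw [hA]
  set g := r.foldl
      (fun (g : PySem.Dict Int (List (List String))) p =>
        g.modify p.1 [] (fun rs => rs ++ [[p.2.1, p.2.2]]))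
      PySem.Dict.empty with hgdef
  have hB : (g.items.foldl
      (fun (st : PySem.Dict Int Int × PySem.Dict Int (List String)) q =>
        (st.1.insert q.1 (q.2.length : Int),
         if (q.2.length == 1) then st.2.insert q.1 (PySem.List.pyGetD q.2 0 []) else st.2))
      (PySem.Dict.empty, PySem.Dict.empty))
      = (g.items.foldl (fun (d : PySem.Dict Int Int) q => d.insert q.1 (q.2.length : Int)) PySem.Dict.empty,
         g.items.foldl (fun (m : PySem.Dict Int (List String)) q =>
           if (q.2.length == 1) then m.insert q.1 (PySem.List.pyGetD q.2 0 []) else m) PySem.Dict.empty) :=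
    PySem.List.foldl_prod_mk
      (fun (d : PySem.Dict Int Int) (q : Int × List (List String)) => d.insert q.1 (q.2.length : Int))
      (fun (m : PySem.Dict Int (List String)) (q : Int × List (List String)) =>
        if (q.2.length == 1) then m.insert q.1 (PySem.List.pyGetD q.2 0 []) else m)
      g.items PySem.Dict.empty PySem.Dict.empty
  rw [hB]
  -- facts about the grouping dict
  have hgetg : ∀ k : Int, g.getD k [] = (r.filter (fun p => p.1 == k)).map (fun p => [p.2.1, p.2.2]) := by
    intro k
    have hmapfold : g = (r.map (fun p => (p.1, [p.2.1, p.2.2]))).foldl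
        (fun (d : PySem.Dict Int (List (List String))) q => d.modify q.1 [] (fun rs => rs ++ [q.2]))
        PySem.Dict.empty := by
      rw [hgdef, List.foldl_map]
    rw [hmapfold, PySem.Dict.getD_foldl_modify_append]
    simp [List.filter_map, List.map_map, Function.comp_def]
  have hkeysg : g.keys = PySem.Set.ofList lst := by
    rw [hgdef, PySem.Dict.keys_foldl_modify_key r (fun p => p.1) [] (fun _ p rs => rs ++ [[p.2.1, p.2.2]])]
    rw [PySem.Dict.keys_empty, PySem.Set.update_nil_left, hl]
  have hnodupg : g.keys.Nodup := hkeysg ▸ PySem.Set.nodup_ofList lst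
  have hcount : ∀ k : Int, (r.filter (fun p => p.1 == k)).length = lst.count k := by
    intro k
    rw [← hl, ← List.countP_eq_length_filter, List.count_eq_countP, List.countP_map]
    rfl
  have hlen : ∀ k : Int, (g.getD k []).length = lst.count k := by
    intro k; rw [hgetg, List.length_map, hcount]
  have hitemsg : g.items = (PySem.Set.ofList lst : List Int).map (fun k => (k, g.getD k [])) := by
    rw [PySem.Dict.items_eq_map_keys g hnodupg [], hkeysg]
  -- dic_num sides
  have hitemsdA : (r.foldl (fun (d : PySem.Dict Int Int) p => d.insert p.1 ((PySem.List.count lst p.1 : Int))) PySem.Dict.empty).items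
      = (PySem.Set.ofList lst : List Int).map (fun k => (k, (lst.count k : Int))) := by
    have hkeysA : (r.foldl (fun (d : PySem.Dict Int Int) p => d.insert p.1 ((PySem.List.count lst p.1 : Int))) PySem.Dict.empty).keys
        = PySem.Set.ofList lst := by
      rw [PySem.Dict.keys_foldl_insert_key r (fun p => p.1) (fun _ p => ((PySem.List.count lst p.1 : Int))) PySem.Dict.empty,
        PySem.Dict.keys_empty, PySem.Set.update_nil_left, hl]
    have hnodupA := hkeysA ▸ PySem.Set.nodup_ofList lst
    rw [PySem.Dict.items_eq_map_keys _ hnodupA 0, hkeysA]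
    apply List.map_congr_left
    intro k hk
    have hmem : k ∈ lst := (PySem.Set.mem_ofList lst k).mp hk
    have hget := pv_getD_foldl_insert_by_key (fun (p : Int × String × String) => p.1)
      (fun k => ((PySem.List.count lst k : Int))) r PySem.Dict.empty k 0
    rw [hl] at hget
    simp only [PySem.List.count] at hget ⊢
    rw [hget, if_pos hmem]
  have hitemsdB : (g.items.foldl (fun (d : PySem.Dict Int Int) q => d.insert q.1 (q.2.length : Int)) PySem.Dict.empty).items
      = (PySem.Set.ofList lst : List Int).map (fun k => (k, (lst.count k : Int))) := by
    rw [PySem.Dict.items_foldl_insert_fresh g.items (fun q => q.1) (fun q => (q.2.length : Int)) PySem.Dict.empty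
      (by intro a _; rw [PySem.Dict.contains_empty]) hnodupg]
    rw [show (PySem.Dict.empty : PySem.Dict Int Int).items = [] from rfl, List.nil_append,
      hitemsg, List.map_map]
    apply List.map_congr_left
    intro k _
    simp only [Function.comp_apply, hlen k]
  rw [hitemsdA, hitemsdB]
  -- num_detal sides
  have hbeq : ∀ n : Nat, ((n : Int) == (1 : Int)) = (n == 1) := by
    intro n; by_cases h : n = 1 <;> simp [h]
  have hm : (r.foldl (fun (m : PySem.Dict Int (List String)) p =>
        if ((PySem.List.count lst p.1 : Int) == 1) then m.insert p.1 [p.2.1, p.2.2] else m) PySem.Dict.empty).items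
      = (g.items.foldl (fun (m : PySem.Dict Int (List String)) q =>
        if (q.2.length == 1) then m.insert q.1 (PySem.List.pyGetD q.2 0 []) else m) PySem.Dict.empty).items := by
    rw [← List.foldl_filter, ← List.foldl_filter]
    set rf := r.filter (fun p => ((PySem.List.count lst p.1 : Int) == 1)) with hrf
    set lf := g.items.filter (fun q => (q.2.length == 1)) with hlf
    -- the keys reached on the A side are exactly the count-one values, each once
    have hrfmap : rf.map (fun p => p.1) = lst.filter (fun k => (lst.count k == 1)) := by
      rw [hrf, ← hl, List.filter_map]
      apply congrArg
      apply List.filter_congr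
      intro p _
      simp only [Function.comp_apply, PySem.List.count, hbeq]
    have hnodrf : (rf.map (fun p => p.1)).Nodup := by
      rw [hrfmap, List.nodup_iff_count_le_one]
      intro a
      by_cases h : (lst.count a == 1) = true
      · rw [List.count_filter (by simp [h])]
        exact Nat.le_of_eq (by simpa using h)
      · have : a ∉ lst.filter (fun k => (lst.count k == 1)) := by
          simp only [List.mem_filter]
          rintro ⟨-, hc⟩
          exact h hc
        simp [List.count_eq_zero.mpr this]
    have hmA : (rf.foldl (fun (m : PySem.Dict Int (List String)) p => m.insert p.1 [p.2.1, p.2.2]) PySem.Dict.empty).items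
        = rf.map (fun p => (p.1, [p.2.1, p.2.2])) := by
      rw [PySem.Dict.items_foldl_insert_fresh rf (fun p => p.1) (fun p => [p.2.1, p.2.2]) PySem.Dict.empty
        (by intro a _; rw [PySem.Dict.contains_empty]) hnodrf]
      rw [show (PySem.Dict.empty : PySem.Dict Int (List String)).items = [] from rfl, List.nil_append]
    have hnodlf : (lf.map (fun q => q.1)).Nodup := by
      have hsub : (lf.map (fun (q : Int × List (List String)) => q.1)).Sublist (g.items.map (fun q => q.1)) :=
        List.Sublist.map _ List.filter_sublist
      exact hsub.nodup (by simpa [PySem.Dict.keys] using hnodupg)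
    have hmB : (lf.foldl (fun (m : PySem.Dict Int (List String)) q => m.insert q.1 (PySem.List.pyGetD q.2 0 [])) PySem.Dict.empty).items
        = lf.map (fun q => (q.1, PySem.List.pyGetD q.2 0 [])) := by
      rw [PySem.Dict.items_foldl_insert_fresh lf (fun q => q.1) (fun q => PySem.List.pyGetD q.2 0 []) PySem.Dict.empty
        (by intro a _; rw [PySem.Dict.contains_empty]) hnodlf]
      rw [show (PySem.Dict.empty : PySem.Dict Int (List String)).items = [] from rfl, List.nil_append]
    have hlff : lf = (lst.filter (fun k => (lst.count k == 1))).map (fun k => (k, g.getD k [])) := by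
      rw [hlf, hitemsg, List.filter_map]
      apply congrArg
      rw [show ((fun (q : Int × List (List String)) => (q.2.length == 1)) ∘ fun k => (k, g.getD k []))
            = fun k => ((g.getD k []).length == 1) from rfl]
      rw [List.filter_congr (fun k _ => by rw [hlen k])]
      exact pv_ofList_filter_count_one _ lst (fun k hk => Nat.le_of_eq (by simpa using hk))
    rw [hmA, hmB, hlff, List.map_map, ← hrfmap, List.map_map]
    apply List.map_congr_left
    intro p hp
    have hpr : p ∈ r := (List.mem_filter.mp hp).1
    have hpc : lst.count p.1 = 1 := by
      have := (List.mem_filter.mp hp).2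
      simpa [PySem.List.count, hbeq] using this
    have hone : (r.filter (fun q => q.1 == p.1)).length = 1 := by rw [hcount, hpc]
    obtain ⟨a, ha⟩ := List.length_eq_one_iff.mp hone
    have hpa : p = a := by
      have : p ∈ r.filter (fun q => q.1 == p.1) := List.mem_filter.mpr ⟨hpr, by simp⟩
      rw [ha] at this
      simpa using this
    have hgp : g.getD p.1 [] = [[p.2.1, p.2.2]] := by
      rw [hgetg, ha, ← hpa]
      rfl
    simp only [Function.comp_apply, hgp, PySem.List.pyGetD_zero_cons]
  rw [hm]

theorem pv_glue (lst : List Int) (dates : List String) (detals : List String)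
    (hy : lst.length ≤ dates.length) (hz : lst.length ≤ detals.length) :
    getDic2 lst dates detals = getDic2_alt lst dates detals := by
  unfold getDic2 getDic2_alt
  simp only []
  have e1 : PySem.List.pyRange 0 (lst.length : Int) 1 = (List.range lst.length).map (fun (k : Nat) => ((k : Int))) := by
    rw [PySem.List.pyRange_one]
    simp
  rw [e1, List.foldl_map, pv_enumerate_eq_map_range lst, List.foldl_map]
  simp only [PySem.List.pyGetD_natCast]
  have eA : (List.range lst.length).foldl
      (fun (st : PySem.Dict Int Int × PySem.Dict Int (List String)) (k : Nat) =>
        (st.1.insert (lst.getD k 0) ((PySem.List.count lst (lst.getD k 0) : Int)),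
         if ((PySem.List.count lst (lst.getD k 0) : Int) == 1) then
           st.2.insert (lst.getD k 0) [dates.getD k "", detals.getD k ""]
         else st.2))
      (PySem.Dict.empty, PySem.Dict.empty)
      = (lst.zip (dates.zip detals)).foldl
        (fun (st : PySem.Dict Int Int × PySem.Dict Int (List String)) p =>
          (st.1.insert p.1 ((PySem.List.count lst p.1 : Int)),
           if ((PySem.List.count lst p.1 : Int) == 1) then st.2.insert p.1 [p.2.1, p.2.2] else st.2))
        (PySem.Dict.empty, PySem.Dict.empty) :=
    pv_foldl_range_get3
      (fun st num date detal =>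
        (st.1.insert num ((PySem.List.count lst num : Int)),
         if ((PySem.List.count lst num : Int) == 1) then st.2.insert num [date, detal] else st.2))
      lst dates detals (PySem.Dict.empty, PySem.Dict.empty) hy hz
  have eB : (List.range lst.length).foldl
      (fun (g : PySem.Dict Int (List (List String))) (k : Nat) =>
        g.modify (lst.getD k 0) [] (fun rs => rs ++ [[dates.getD k "", detals.getD k ""]]))
      PySem.Dict.empty
      = (lst.zip (dates.zip detals)).foldl
        (fun (g : PySem.Dict Int (List (List String))) p =>
          g.modify p.1 [] (fun rs => rs ++ [[p.2.1, p.2.2]]))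
        PySem.Dict.empty :=
    pv_foldl_range_get3
      (fun g num date detal => g.modify num [] (fun rs => rs ++ [[date, detal]]))
      lst dates detals PySem.Dict.empty hy hz
  rw [eA, eB]
  have hrows : ((lst.zip (dates.zip detals)).map (fun p => p.1)) = lst := by
    apply List.map_fst_zip
    rw [List.length_zip]
    exact le_min hy hz
  exact pv_main lst (lst.zip (dates.zip detals)) hrows

-- ===== VERDICT (by name: the statement is the Claim_ definition above) =====
theorem getDic2_spec : Claim_equal_getDic2 := by
  intro lst dates detals _ hpre
  unfold Spec_getDic2
  exact pv_glue lst dates detals hpre.1 hpre.2
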